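-- pv_equiv track=rewrite | github.com/Paraz10/DQ_4-5-6_DS_Data | DQ4/DQ4_RNG_Functions.py | will_seed_drop_item
-- ===== SOURCE A (Python) =====
-- def will_seed_drop_item(seed: int, drop_rate: int) -> bool:
--     rng = seed
--     # Ensure drop_rate is between 0 and 31
--     if drop_rate < 0 or drop_rate > 31:
--         raise ValueError("drop_rate must be between 0 and 31")
--
--     # Check if the first drop_rate bits of the seed are 0
--     for i in range(32, 32-drop_rate-1, -1):
--         # check the i-th bit of the seed
--         if (rng >> i) != 0:
--             return False
--     return True  # If all bits are 0, the item will drop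
-- ===== SOURCE B (Python) =====
-- def will_seed_drop_item(seed: int, drop_rate: int) -> bool:
--     if drop_rate < 0 or drop_rate > 31:
--         raise ValueError("drop_rate must be between 0 and 31")
--     # By monotonicity of right shift, all of seed>>32 ... seed>>(32-drop_rate)
--     # are zero iff the smallest shift is zero.
--     return (seed >> (32 - drop_rate)) == 0
-- ===== Notes on version B (the rewrite author's own statement) =====
-- stated objective: simpler
-- what changed: The descending bit-check loop is replaced by a single closed-form comparison (seed >> (32 - drop_rate)) == 0, justified by monotonicity of arithmetic right shift.
import Mathlib
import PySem

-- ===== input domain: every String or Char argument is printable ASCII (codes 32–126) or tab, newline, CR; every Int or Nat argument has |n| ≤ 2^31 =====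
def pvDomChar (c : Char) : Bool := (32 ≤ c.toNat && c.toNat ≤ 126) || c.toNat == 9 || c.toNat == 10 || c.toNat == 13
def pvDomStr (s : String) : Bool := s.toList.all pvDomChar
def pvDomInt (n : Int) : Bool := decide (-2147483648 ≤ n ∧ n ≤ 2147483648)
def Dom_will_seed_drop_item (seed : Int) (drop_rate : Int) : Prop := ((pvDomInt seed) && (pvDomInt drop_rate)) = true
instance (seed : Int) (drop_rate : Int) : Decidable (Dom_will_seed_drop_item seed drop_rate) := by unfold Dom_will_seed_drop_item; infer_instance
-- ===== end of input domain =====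

-- B replaces A's descending bit-check loop with one closed-form shift comparison (simpler; same guard, same values).

-- ===== PORT A =====
-- the for-loop with early return: recurse over the list of shift amounts
def pvLoopA (seed : Int) : List Int → Bool
  | [] => true
  | i :: rest => if seed >>> i.toNat ≠ 0 then false else pvLoopA seed rest

def will_seed_drop_item (seed : Int) (drop_rate : Int) : Bool :=
  if drop_rate < 0 || drop_rate > 31 then false  -- Python raises ValueError here; excluded by Pre_
  else pvLoopA seed (PySem.List.pyRange 32 (32 - drop_rate - 1) (-1))

-- ===== PORT B =====
def will_seed_drop_item_alt (seed : Int) (drop_rate : Int) : Bool :=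
  if drop_rate < 0 || drop_rate > 31 then false  -- Python raises ValueError here; excluded by Pre_
  else decide (seed >>> (32 - drop_rate).toNat = 0)

-- ===== PRECONDITION & SPEC =====
-- Pre_ excludes exactly the inputs where A raises ValueError (drop_rate outside 0..31)
def Pre_will_seed_drop_item (seed : Int) (drop_rate : Int) : Prop := 0 ≤ drop_rate ∧ drop_rate ≤ 31
instance (seed : Int) (drop_rate : Int) : Decidable (Pre_will_seed_drop_item seed drop_rate) := by unfold Pre_will_seed_drop_item; infer_instance
def pvWitness_will_seed_drop_item : Int × Int := (5, 3)

def Spec_will_seed_drop_item (seed : Int) (drop_rate : Int) (out : Bool) : Prop := out = will_seed_drop_item_alt seed drop_rate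
instance (seed : Int) (drop_rate : Int) (out : Bool) : Decidable (Spec_will_seed_drop_item seed drop_rate out) := by unfold Spec_will_seed_drop_item; infer_instance

-- ===== CLAIM (what is proved, stated in full; the proofs are below) =====
def Claim_equal_will_seed_drop_item : Prop := ∀ (seed : Int) (drop_rate : Int), Dom_will_seed_drop_item seed drop_rate → Pre_will_seed_drop_item seed drop_rate → Spec_will_seed_drop_item seed drop_rate (will_seed_drop_item seed drop_rate)

-- ===== LEMMAS AND PROOFS =====

-- monotonicity of arithmetic right shift: once some shift is 0, every larger shift is 0
theorem pvShift_mono (n : Int) (a b : Nat) (hab : a ≤ b) (h0 : n >>> a = 0) : n >>> b = 0 := by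
  have hb : b = a + (b - a) := by omega
  rw [hb, Int.shiftRight_add, h0]
  simp [Int.shiftRight_eq_div_pow]

theorem pvLoopA_true (seed : Int) (l : List Int) (h : ∀ i ∈ l, seed >>> i.toNat = 0) :
    pvLoopA seed l = true := by
  induction l with
  | nil => rfl
  | cons i rest ih =>
    simp only [pvLoopA]
    rw [if_neg (by simpa using h i (List.mem_cons_self))]
    exact ih (fun j hj => h j (List.mem_cons_of_mem _ hj))

theorem pvLoopA_false (seed m : Int) (l : List Int) (hm : m ∈ l) (h : seed >>> m.toNat ≠ 0) :
    pvLoopA seed l = false := by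
  induction l with
  | nil => cases hm
  | cons i rest ih =>
    simp only [pvLoopA]
    by_cases hi : seed >>> i.toNat ≠ 0
    · rw [if_pos hi]
    · rw [if_neg hi]
      rcases List.mem_cons.mp hm with rfl | hmem
      · exact absurd (not_not.mp hi) h
      · exact ih hmem

-- ===== VERDICT (by name: the statement is the Claim_ definition above) =====
theorem will_seed_drop_item_spec : Claim_equal_will_seed_drop_item := by
  intro seed drop_rate _ hpre
  obtain ⟨h0, h31⟩ := hpre
  unfold Spec_will_seed_drop_item will_seed_drop_item will_seed_drop_item_alt
  have hguard : (drop_rate < 0 || drop_rate > 31) = false := by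
    simp only [Bool.or_eq_false_iff, decide_eq_false_iff_not, not_lt]
    exact ⟨h0, h31⟩
  rw [hguard]
  simp only [Bool.false_eq_true, if_false]
  by_cases hz : seed >>> (32 - drop_rate).toNat = 0
  · rw [pvLoopA_true seed _ (fun i hi => ?_), decide_eq_true hz]
    rw [PySem.List.mem_pyRange_neg_one] at hi
    exact pvShift_mono seed (32 - drop_rate).toNat i.toNat (by omega) hz
  · rw [pvLoopA_false seed (32 - drop_rate) _ ?_ hz, decide_eq_false hz]
    rw [PySem.List.mem_pyRange_neg_one]
    omega
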